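-- pv_equiv track=rewrite | github.com/RipFran/intelhunterx | intelhunterx/state.py | normalize_selectors
-- ===== SOURCE A (Python) =====
-- from typing import Dict, Iterable
--
-- def normalize_selectors(selectors: Iterable[str]) -> list[str]:
--     normalized = []
--     seen = set()
--     for raw in selectors:
--         value = raw.strip().lower()
--         if not value:
--             continue
--         if value in seen:
--             continue
--         seen.add(value)
--         normalized.append(value)
--     return sorted(normalized)
-- ===== SOURCE B (Python) =====
-- def normalize_selectors(selectors):
--     # Normalize first, sort, then remove adjacent duplicates in one pass
--     # (no 'seen' set: sorting puts equal values next to each other).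
--     vals = sorted(v for v in (raw.strip().lower() for raw in selectors) if v)
--     if not vals:
--         return []
--     head, rest = vals[0], vals[1:]
--     result = [head]
--     prev = head
--     for v in rest:
--         if v != prev:
--             result.append(v)
--             prev = v
--     return result
-- ===== Notes on version B (the rewrite author's own statement) =====
-- stated objective: simpler
-- what changed: A dedups during the input scan with a 'seen' set and sorts at the end; B normalizes, sorts first, and dedups by a single adjacent-comparison pass over the sorted list, with no seen set.
import Mathlib
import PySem

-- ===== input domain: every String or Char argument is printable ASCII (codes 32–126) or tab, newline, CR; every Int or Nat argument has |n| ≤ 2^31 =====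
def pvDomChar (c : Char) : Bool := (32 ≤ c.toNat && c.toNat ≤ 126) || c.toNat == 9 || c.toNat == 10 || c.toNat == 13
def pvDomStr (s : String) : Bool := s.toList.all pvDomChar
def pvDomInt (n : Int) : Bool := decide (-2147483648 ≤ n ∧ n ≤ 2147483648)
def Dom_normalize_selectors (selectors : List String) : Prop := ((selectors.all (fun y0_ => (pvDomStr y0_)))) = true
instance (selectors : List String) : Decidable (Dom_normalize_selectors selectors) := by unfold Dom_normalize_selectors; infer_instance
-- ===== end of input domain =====

-- B sorts the normalized non-empty values first and removes adjacent duplicates in a single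
-- pass, instead of maintaining a 'seen' set during the input scan; objective: simpler.


-- ===== PORT A =====
def normalize_selectors (selectors : List String) : List String :=
  let r := selectors.foldl (fun (acc : List String × PySem.Set String) raw =>
      let value := PySem.Str.lower (PySem.Str.strip raw)
      if value = "" then acc
      else if PySem.Set.contains acc.2 value then acc
      else (acc.1 ++ [value], PySem.Set.add acc.2 value))
    ([], PySem.Set.empty)
  PySem.List.sorted r.1 (fun x => x) false

-- ===== PORT B =====
def normalize_selectors_alt (selectors : List String) : List String :=
  let vals := PySem.List.sorted
      ((selectors.map (fun raw => PySem.Str.lower (PySem.Str.strip raw))).filter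
        (fun v => !(v == ""))) (fun x => x) false
  match vals with
  | [] => []
  | head :: rest =>
      (rest.foldl (fun (acc : List String × String) v =>
          if v ≠ acc.2 then (acc.1 ++ [v], v) else acc) ([head], head)).1

-- ===== PRECONDITION & SPEC =====
def Spec_normalize_selectors (selectors : List String) (out : List String) : Prop := out = normalize_selectors_alt selectors
instance (selectors : List String) (out : List String) : Decidable (Spec_normalize_selectors selectors out) := by unfold Spec_normalize_selectors; infer_instance

-- ===== CLAIM (what is proved, stated in full; the proofs are below) =====
def Claim_equal_normalize_selectors : Prop := ∀ (selectors : List String), Dom_normalize_selectors selectors → Spec_normalize_selectors selectors (normalize_selectors selectors)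

-- ===== LEMMAS AND PROOFS =====

-- B's dedup loop, in structural-recursion form
def dedupFrom (prev : String) : List String → List String
  | [] => []
  | x :: xs => if x = prev then dedupFrom prev xs else x :: dedupFrom x xs

theorem dedupFrom_cons_eq (prev : String) (xs : List String) :
    dedupFrom prev (prev :: xs) = dedupFrom prev xs := by
  simp [dedupFrom]

theorem dedupFrom_cons_ne {x prev : String} (h : x ≠ prev) (xs : List String) :
    dedupFrom prev (x :: xs) = x :: dedupFrom x xs := by
  simp [dedupFrom, h]

theorem foldlB (xs : List String) (acc : List String) (prev : String) :
    (xs.foldl (fun (acc : List String × String) v =>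
        if v ≠ acc.2 then (acc.1 ++ [v], v) else acc) (acc, prev)).1
      = acc ++ dedupFrom prev xs := by
  induction xs generalizing acc prev with
  | nil => simp [dedupFrom]
  | cons x xs ih =>
    simp only [List.foldl_cons]
    by_cases h : x = prev
    · rw [if_neg (by simp [h]), h, dedupFrom_cons_eq, ih]
    · rw [if_pos h, dedupFrom_cons_ne h, ih]
      simp

theorem mem_dedupFrom (xs : List String) (prev : String)
    (h : (prev :: xs).Pairwise (· ≤ ·)) :
    ∀ y, y ∈ dedupFrom prev xs ↔ y ∈ xs ∧ y ≠ prev := by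
  induction xs generalizing prev with
  | nil => simp [dedupFrom]
  | cons x xs ih =>
    intro y
    rcases List.pairwise_cons.mp h with ⟨hle, htail⟩
    by_cases hx : x = prev
    · subst hx
      rw [dedupFrom_cons_eq]
      have h' : (x :: xs).Pairwise (· ≤ ·) := by
        refine List.pairwise_cons.mpr ⟨?_, (List.pairwise_cons.mp htail).2⟩
        intro z hz; exact hle z (List.mem_cons_of_mem _ hz)
      rw [ih x h' y]
      constructor
      · rintro ⟨hy, hne⟩; exact ⟨List.mem_cons_of_mem _ hy, hne⟩
      · rintro ⟨hy, hne⟩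
        rcases List.mem_cons.mp hy with rfl | hy
        · exact absurd rfl hne
        · exact ⟨hy, hne⟩
    · have hlt : prev < x := lt_of_le_of_ne (hle x (List.mem_cons_self)) (Ne.symm hx)
      rw [dedupFrom_cons_ne hx, List.mem_cons, ih x htail y]
      constructor
      · rintro (rfl | ⟨hy, _⟩)
        · exact ⟨List.mem_cons_self, hx⟩
        · have hxle : x ≤ y := (List.pairwise_cons.mp htail).1 y hy
          exact ⟨List.mem_cons_of_mem _ hy, fun hp => absurd (hp ▸ hxle) (not_le_of_gt hlt)⟩
      · rintro ⟨hy, hne⟩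
        rcases List.mem_cons.mp hy with rfl | hy
        · exact Or.inl rfl
        · by_cases hyx : y = x
          · exact Or.inl hyx
          · exact Or.inr ⟨hy, hyx⟩

theorem pairwise_dedupFrom (xs : List String) (prev : String)
    (h : (prev :: xs).Pairwise (· ≤ ·)) :
    (prev :: dedupFrom prev xs).Pairwise (· < ·) := by
  induction xs generalizing prev with
  | nil => simp [dedupFrom]
  | cons x xs ih =>
    rcases List.pairwise_cons.mp h with ⟨hle, htail⟩
    by_cases hx : x = prev
    · subst hx
      rw [dedupFrom_cons_eq]
      refine ih x ?_
      refine List.pairwise_cons.mpr ⟨?_, (List.pairwise_cons.mp htail).2⟩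
      intro z hz; exact hle z (List.mem_cons_of_mem _ hz)
    · have hlt : prev < x := lt_of_le_of_ne (hle x (List.mem_cons_self)) (Ne.symm hx)
      simp only [dedupFrom, if_neg hx]
      have hrec : (x :: dedupFrom x xs).Pairwise (· < ·) := ih x htail
      refine List.pairwise_cons.mpr ⟨?_, hrec⟩
      intro z hz
      rcases List.mem_cons.mp hz with rfl | hz
      · exact hlt
      · have hzxs : z ∈ xs := ((mem_dedupFrom xs x htail z).mp hz).1
        exact lt_of_lt_of_le hlt ((List.pairwise_cons.mp htail).1 z hzxs)

-- A's loop keeps its list and its set equal, and both are foldl of Set.add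
theorem loopA (sel : List String) (s : PySem.Set String) :
    sel.foldl (fun (acc : List String × PySem.Set String) raw =>
        let value := PySem.Str.lower (PySem.Str.strip raw)
        if value = "" then acc
        else if PySem.Set.contains acc.2 value then acc
        else (acc.1 ++ [value], PySem.Set.add acc.2 value)) (s, s)
      = (((sel.map (fun raw => PySem.Str.lower (PySem.Str.strip raw))).filter
            (fun v => !(v == ""))).foldl PySem.Set.add s,
         ((sel.map (fun raw => PySem.Str.lower (PySem.Str.strip raw))).filter
            (fun v => !(v == ""))).foldl PySem.Set.add s) := by
  induction sel generalizing s with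
  | nil => simp
  | cons raw sel ih =>
    simp only [List.foldl_cons, List.map_cons, List.filter_cons]
    by_cases h0 : PySem.Str.lower (PySem.Str.strip raw) = ""
    · simpa [h0] using ih s
    · have hb : (!(PySem.Str.lower (PySem.Str.strip raw) == "")) = true := by
        simp [h0]
      by_cases hm : PySem.Str.lower (PySem.Str.strip raw) ∈ s
      · have hc : PySem.Set.contains s (PySem.Str.lower (PySem.Str.strip raw)) = true := by
          simp [PySem.Set.contains, hm]
        have hadd := PySem.Set.add_of_mem (s := s) hm
        simp only [hb, if_neg h0, hc, if_pos, List.foldl_cons]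
        rw [← hadd] at *
        simpa [hadd] using ih (PySem.Set.add s (PySem.Str.lower (PySem.Str.strip raw)))
      · have hc : PySem.Set.contains s (PySem.Str.lower (PySem.Str.strip raw)) = false := by
          simp [PySem.Set.contains, hm]
        have hadd := PySem.Set.add_of_not_mem (s := s) hm
        simp only [hb, if_neg h0, hc, Bool.false_eq_true, if_false]
        rw [← hadd]
        exact ih (PySem.Set.add s (PySem.Str.lower (PySem.Str.strip raw)))

-- ===== VERDICT (by name: the statement is the Claim_ definition above) =====
theorem normalize_selectors_spec : Claim_equal_normalize_selectors := by
  intro selectors _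
  unfold Spec_normalize_selectors normalize_selectors normalize_selectors_alt
  set vals := (selectors.map (fun raw => PySem.Str.lower (PySem.Str.strip raw))).filter
      (fun v => !(v == "")) with hvals
  have hA : (selectors.foldl (fun (acc : List String × PySem.Set String) raw =>
      let value := PySem.Str.lower (PySem.Str.strip raw)
      if value = "" then acc
      else if PySem.Set.contains acc.2 value then acc
      else (acc.1 ++ [value], PySem.Set.add acc.2 value)) ([], PySem.Set.empty)).1
      = PySem.Set.ofList vals := by
    have := loopA selectors PySem.Set.empty
    simp only [PySem.Set.empty] at this ⊢
    rw [this, PySem.Set.ofList_eq_foldl]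
  simp only [hA]
  rcases hsv : PySem.List.sorted vals (fun x => x) false with _ | ⟨head, rest⟩
  · have hv : vals = [] := (PySem.List.sorted_eq_nil_iff _ _ _).mp hsv
    simp only [hv]
    rfl
  · have hpw : (head :: rest).Pairwise (· ≤ ·) := by
      have := PySem.List.sorted_pairwise (xs := vals) (key := fun x => x)
      rwa [hsv] at this
    have hB : (rest.foldl (fun (acc : List String × String) v =>
        if v ≠ acc.2 then (acc.1 ++ [v], v) else acc) ([head], head)).1
        = head :: dedupFrom head rest := by
      simpa using foldlB rest [head] head
    dsimp only
    rw [hB]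
    have hlt : (head :: dedupFrom head rest).Pairwise (· < ·) :=
      pairwise_dedupFrom rest head hpw
    have hnodupB : (head :: dedupFrom head rest).Nodup :=
      hlt.imp (fun h => ne_of_lt h)
    have hmem : ∀ y, y ∈ head :: dedupFrom head rest ↔ y ∈ PySem.Set.ofList vals := by
      intro y
      rw [PySem.Set.mem_ofList]
      have hmv : y ∈ vals ↔ y ∈ head :: rest := by
        rw [← hsv, PySem.List.mem_sorted]
      rw [hmv, List.mem_cons, List.mem_cons, mem_dedupFrom rest head hpw y]
      constructor
      · rintro (rfl | ⟨hy, _⟩)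
        · exact Or.inl rfl
        · exact Or.inr hy
      · rintro (rfl | hy)
        · exact Or.inl rfl
        · by_cases hyh : y = head
          · exact Or.inl hyh
          · exact Or.inr ⟨hy, hyh⟩
    have hperm : (head :: dedupFrom head rest).Perm (PySem.Set.ofList vals) :=
      (List.perm_ext_iff_of_nodup hnodupB (PySem.Set.nodup_ofList vals)).mpr hmem
    exact PySem.List.sorted_eq_of_perm_of_pairwise_lt _ _ _ hperm hlt
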